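-- pv_equiv track=rewrite | github.com/edwardburns1/sleep_sensor | data_analysis_scripts/dataset_analysis.py | categorize_latency
-- ===== SOURCE A (Python) =====
-- def categorize_latency(latency_data):
--     categories = {
--         "Normal": 0,
--         "Mild Insomnia": 0,
--         "Severe Insomnia": 0
--     }
--
--     for latency in latency_data.values():
--         if latency <= 30:
--             categories["Normal"] += 1
--         elif latency <= 90:
--             categories["Mild Insomnia"] += 1
--         else:
--             categories["Severe Insomnia"] += 1
--
--     return categories
-- ===== SOURCE B (Python) =====
-- def _bisect_right(a, x):
--     # standard bisect.bisect_right binary-search loop (module not imported by A)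
--     lo, hi = 0, len(a)
--     while lo < hi:
--         mid = (lo + hi) // 2
--         if x < a[mid]:
--             hi = mid
--         else:
--             lo = mid + 1
--     return lo
--
--
-- def categorize_latency(latency_data):
--     vs = sorted(latency_data.values())
--     n30 = _bisect_right(vs, 30)
--     n90 = _bisect_right(vs, 90)
--     return {
--         "Normal": n30,
--         "Mild Insomnia": n90 - n30,
--         "Severe Insomnia": len(vs) - n90,
--     }
-- ===== Notes on version B (the rewrite author's own statement) =====
-- stated objective: alternative
-- what changed: Replaces the single-pass cascading branch-count with sort-then-binary-search: sort the latency values once and read the two inclusive boundaries 30 and 90 off with bisect_right, deriving all three category counts from the boundary positions.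
import Mathlib
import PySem

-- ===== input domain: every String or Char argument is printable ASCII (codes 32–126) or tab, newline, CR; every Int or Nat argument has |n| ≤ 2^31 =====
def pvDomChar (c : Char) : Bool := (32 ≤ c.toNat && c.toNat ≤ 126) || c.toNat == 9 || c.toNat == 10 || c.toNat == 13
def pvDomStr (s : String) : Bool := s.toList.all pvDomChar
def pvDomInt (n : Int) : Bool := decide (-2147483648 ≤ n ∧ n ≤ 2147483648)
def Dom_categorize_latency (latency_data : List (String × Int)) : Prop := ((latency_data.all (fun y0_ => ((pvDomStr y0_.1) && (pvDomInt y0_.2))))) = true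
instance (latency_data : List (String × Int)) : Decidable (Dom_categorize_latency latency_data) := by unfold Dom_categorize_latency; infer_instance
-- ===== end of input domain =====

-- B replaces A's single-pass cascading branch-count with sort + two bisect_right boundary lookups (alternative decomposition, same results).


-- ===== PORT A =====
def categorize_latency (latency_data : List (String × Int)) : List (String × Int) :=
  let categories : PySem.Dict String Int :=
    PySem.Dict.ofList [("Normal", 0), ("Mild Insomnia", 0), ("Severe Insomnia", 0)]
  let categories := latency_data.foldl (fun d kv =>
    let latency := kv.2
    if latency ≤ 30 then d.insert "Normal" (d.getD "Normal" 0 + 1)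
    else if latency ≤ 90 then d.insert "Mild Insomnia" (d.getD "Mild Insomnia" 0 + 1)
    else d.insert "Severe Insomnia" (d.getD "Severe Insomnia" 0 + 1)) categories
  categories.items

-- ===== PORT B =====
-- _bisect_right in Source B is the standard lo/hi binary-search loop of bisect.bisect_right;
-- PySem.List.bisectRight is exactly that loop.
def categorize_latency_alt (latency_data : List (String × Int)) : List (String × Int) :=
  let vs := PySem.List.sorted (latency_data.map (·.2)) (fun x => x) false
  let n30 := PySem.List.bisectRight vs 30
  let n90 := PySem.List.bisectRight vs 90
  [("Normal", (n30 : Int)),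
   ("Mild Insomnia", (n90 : Int) - (n30 : Int)),
   ("Severe Insomnia", (vs.length : Int) - (n90 : Int))]

-- ===== PRECONDITION & SPEC =====
def Spec_categorize_latency (latency_data : List (String × Int)) (out : List (String × Int)) : Prop := out = categorize_latency_alt latency_data
instance (latency_data : List (String × Int)) (out : List (String × Int)) : Decidable (Spec_categorize_latency latency_data out) := by unfold Spec_categorize_latency; infer_instance

-- ===== CLAIM (what is proved, stated in full; the proofs are below) =====
def Claim_equal_categorize_latency : Prop := ∀ (latency_data : List (String × Int)), Dom_categorize_latency latency_data → Spec_categorize_latency latency_data (categorize_latency latency_data)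

-- ===== LEMMAS AND PROOFS =====

-- the loop body of port A, named for the proofs
def pvStepA (d : PySem.Dict String Int) (kv : String × Int) : PySem.Dict String Int :=
    let latency := kv.2
    if latency ≤ 30 then d.insert "Normal" (d.getD "Normal" 0 + 1)
    else if latency ≤ 90 then d.insert "Mild Insomnia" (d.getD "Mild Insomnia" 0 + 1)
    else d.insert "Severe Insomnia" (d.getD "Severe Insomnia" 0 + 1)

theorem pvLoopA (l : List (String × Int)) (a b c : Int) :
    l.foldl pvStepA (PySem.Dict.mk [("Normal", a), ("Mild Insomnia", b), ("Severe Insomnia", c)])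
    = PySem.Dict.mk [("Normal", a + (l.countP (fun kv => decide (kv.2 ≤ 30)) : Int)),
        ("Mild Insomnia", b + (l.countP (fun kv => decide (¬ kv.2 ≤ 30 ∧ kv.2 ≤ 90)) : Int)),
        ("Severe Insomnia", c + (l.countP (fun kv => decide (¬ kv.2 ≤ 30 ∧ ¬ kv.2 ≤ 90)) : Int))] := by
  induction l generalizing a b c with
  | nil => simp
  | cons kv t ih =>
    rw [List.foldl_cons]
    by_cases h30 : kv.2 ≤ 30
    · have hstep : pvStepA (PySem.Dict.mk [("Normal", a), ("Mild Insomnia", b), ("Severe Insomnia", c)]) kv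
          = PySem.Dict.mk [("Normal", a + 1), ("Mild Insomnia", b), ("Severe Insomnia", c)] := by
        simp only [pvStepA]; rw [if_pos h30]; rfl
      rw [hstep, ih]
      simp [h30]
      omega
    · have h30' : (30:Int) < kv.2 := by omega
      by_cases h90 : kv.2 ≤ 90
      · have hstep : pvStepA (PySem.Dict.mk [("Normal", a), ("Mild Insomnia", b), ("Severe Insomnia", c)]) kv
            = PySem.Dict.mk [("Normal", a), ("Mild Insomnia", b + 1), ("Severe Insomnia", c)] := by
          simp only [pvStepA]; rw [if_neg h30, if_pos h90]; rfl
        rw [hstep, ih]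
        simp [h30, h30', h90]
        omega
      · have h90' : (90:Int) < kv.2 := by omega
        have hstep : pvStepA (PySem.Dict.mk [("Normal", a), ("Mild Insomnia", b), ("Severe Insomnia", c)]) kv
            = PySem.Dict.mk [("Normal", a), ("Mild Insomnia", b), ("Severe Insomnia", c + 1)] := by
          simp only [pvStepA]; rw [if_neg h30, if_neg h90]; rfl
        rw [hstep, ih]
        simp [h30, h30', h90, h90']
        omega

-- on a (≤)-sorted list, bisect_right x counts the elements ≤ x
theorem pvBisect_eq_countP (xs : List Int) (x : Int) (h : xs.Pairwise (· ≤ ·)) :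
    PySem.List.bisectRight xs x = xs.countP (fun v => decide (v ≤ x)) := by
  obtain ⟨hle, hlt, hgt⟩ := PySem.List.bisectRight_spec xs x h
  set k := PySem.List.bisectRight xs x with hk
  rw [← List.take_append_drop k xs, List.countP_append]
  have h1 : (xs.take k).countP (fun v => decide (v ≤ x)) = (xs.take k).length := by
    apply List.countP_eq_length.2
    intro v hv
    obtain ⟨j, hj, rfl⟩ := List.mem_iff_getElem.1 hv
    simp only [List.getElem_take]
    exact decide_eq_true (hlt j (by simp at hj; omega) (by simp at hj; omega))
  have h2 : (xs.drop k).countP (fun v => decide (v ≤ x)) = 0 := by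
    apply List.countP_eq_zero.2
    intro v hv
    obtain ⟨j, hj, rfl⟩ := List.mem_iff_getElem.1 hv
    simp only [List.getElem_drop]
    have := hgt (k + j) (by simp at hj; omega) (by omega)
    simp; omega
  rw [h1, h2, List.length_take]
  omega

-- the three branch counts partition the ≤-90 count and the length
theorem pvCount_split (l : List (String × Int)) :
    l.countP (fun kv => decide (kv.2 ≤ 90))
      = l.countP (fun kv => decide (kv.2 ≤ 30)) + l.countP (fun kv => decide (¬ kv.2 ≤ 30 ∧ kv.2 ≤ 90)) ∧
    l.length
      = l.countP (fun kv => decide (kv.2 ≤ 90)) + l.countP (fun kv => decide (¬ kv.2 ≤ 30 ∧ ¬ kv.2 ≤ 90)) := by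
  induction l with
  | nil => simp
  | cons kv t ih =>
    simp only [List.countP_cons, List.length_cons]
    split_ifs <;> simp only [decide_eq_true_eq] at * <;> omega

-- ===== VERDICT (by name: the statement is the Claim_ definition above) =====
theorem categorize_latency_spec : Claim_equal_categorize_latency := by
  intro latency_data _
  simp only [Spec_categorize_latency, categorize_latency, categorize_latency_alt]
  have hstep : (fun (d : PySem.Dict String Int) (kv : String × Int) =>
      let latency := kv.2
      if latency ≤ 30 then d.insert "Normal" (d.getD "Normal" 0 + 1)
      else if latency ≤ 90 then d.insert "Mild Insomnia" (d.getD "Mild Insomnia" 0 + 1)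
      else d.insert "Severe Insomnia" (d.getD "Severe Insomnia" 0 + 1)) = pvStepA := rfl
  have hinit : (PySem.Dict.ofList [("Normal", 0), ("Mild Insomnia", 0), ("Severe Insomnia", 0)] : PySem.Dict String Int)
      = PySem.Dict.mk [("Normal", 0), ("Mild Insomnia", 0), ("Severe Insomnia", 0)] := rfl
  rw [hstep, hinit, pvLoopA]
  set vs := PySem.List.sorted (latency_data.map (·.2)) (fun x => x) false with hvs
  have hperm : vs.Perm (latency_data.map (·.2)) := PySem.List.sorted_perm _ _ _
  have hpw : vs.Pairwise (· ≤ ·) := PySem.List.sorted_pairwise _ _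
  have h30 : PySem.List.bisectRight vs 30 = latency_data.countP (fun kv => decide (kv.2 ≤ 30)) := by
    rw [pvBisect_eq_countP vs 30 hpw, hperm.countP_eq, List.countP_map]
    rfl
  have h90 : PySem.List.bisectRight vs 90 = latency_data.countP (fun kv => decide (kv.2 ≤ 90)) := by
    rw [pvBisect_eq_countP vs 90 hpw, hperm.countP_eq, List.countP_map]
    rfl
  have hlen : vs.length = latency_data.length := by
    rw [hperm.length_eq, List.length_map]
  obtain ⟨hs1, hs2⟩ := pvCount_split latency_data
  simp only [h30, h90, hlen, hs1, hs2]
  push_cast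
  simp only [List.cons.injEq, Prod.mk.injEq, and_true, true_and]
  refine ⟨by ring, by ring, by ring⟩
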